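-- pv_equiv track=rewrite | github.com/ghorbani-mohammad/Django-Social-Networks-Crawler | social/notification/utils.py | normalize_job_message_spacing
-- ===== SOURCE A (Python) =====
-- def normalize_job_message_spacing(text: str) -> str:
--     """Ensure desired single-blank-line spacing for LinkedIn job messages.
--
--     Rules:
--     - Exactly one blank line AFTER a line starting with "Region:".
--     - Exactly one blank line BEFORE a line starting with "Location:".
--     - Exactly one blank line AFTER a line starting with "Easy Apply:".
--     """
--     # Normalize newlines and trim overall
--     normalized = text.replace("\r\n", "\n").replace("\r", "\n").strip()
--     lines = normalized.split("\n")
--     result = []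
--
--     def starts_with(label: str, line: str) -> bool:
--         return line.lstrip().lower().startswith(label)
--
--     i = 0
--     while i < len(lines):
--         line = lines[i]
--         result.append(line)
--
--         # After Region:
--         if starts_with("region:", line):
--             # Skip any existing blank lines following and add exactly one
--             j = i + 1
--             while j < len(lines) and lines[j].strip() == "":
--                 j += 1
--             if j < len(lines):
--                 result.append("")
--             i = j
--             continue
--
--         # After Easy Apply:
--         if starts_with("easy apply:", line):
--             j = i + 1
--             while j < len(lines) and lines[j].strip() == "":
--                 j += 1
--             if j < len(lines):
--                 result.append("")
--             i = j
--             continue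
--
--         # Before Location:
--         if i + 1 < len(lines) and starts_with("location:", lines[i + 1]):
--             if result and result[-1] != "":
--                 result.append("")
--         i += 1
--
--     # Join back; general collapse will handle any accidental doubles
--     return "\n".join(result).strip()
-- ===== SOURCE B (Python) =====
-- def normalize_job_message_spacing(text: str) -> str:
--     """Ensure desired single-blank-line spacing for LinkedIn job messages.
--
--     One forward pass carrying a `skip_blanks` flag instead of inner
--     blank-skipping loops and index lookahead.
--     """
--     normalized = text.replace("\r\n", "\n").replace("\r", "\n").strip()
--     lines = normalized.split("\n")
--
--     def starts_with(label: str, line: str) -> bool: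
--         return line.lstrip().lower().startswith(label)
--
--     result = []
--     skip_blanks = False
--     for line in lines:
--         if skip_blanks:
--             if line.strip() == "":
--                 continue
--             result.append("")
--             skip_blanks = False
--         if starts_with("location:", line) and result and result[-1] != "":
--             result.append("")
--         result.append(line)
--         if starts_with("region:", line) or starts_with("easy apply:", line):
--             skip_blanks = True
--     return "\n".join(result).strip()
-- ===== Notes on version B (the rewrite author's own statement) =====
-- stated objective: simpler
-- what changed: Replaces A's index-based while loop with inner blank-skipping loops and a lookahead at lines[i+1] by a single forward for-loop that carries a skip_blanks flag and decides the blank-before-Location on the Location line itself via result[-1].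
import Mathlib
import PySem

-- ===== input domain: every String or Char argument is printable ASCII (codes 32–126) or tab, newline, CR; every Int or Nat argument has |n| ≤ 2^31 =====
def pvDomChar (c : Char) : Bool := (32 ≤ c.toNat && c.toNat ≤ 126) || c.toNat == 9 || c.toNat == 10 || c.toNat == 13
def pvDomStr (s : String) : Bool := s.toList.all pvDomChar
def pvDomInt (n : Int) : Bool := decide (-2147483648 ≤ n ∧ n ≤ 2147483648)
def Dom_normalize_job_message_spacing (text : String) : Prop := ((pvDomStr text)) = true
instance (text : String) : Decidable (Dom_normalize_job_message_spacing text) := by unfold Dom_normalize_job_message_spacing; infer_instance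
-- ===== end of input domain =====

-- B replaces A's index-based while loop (with inner blank-skipping loops and a lines[i+1]
-- lookahead) by one forward for-loop carrying a skip_blanks flag; objective: simpler.


-- ===== PORT A =====
-- def starts_with(label, line): return line.lstrip().lower().startswith(label)
def pvStartsWithA (label line : String) : Bool :=
  PySem.Str.startswith (PySem.Str.lower (PySem.Str.lstrip line)) label

-- inner `while j < len(lines) and lines[j].strip() == "": j += 1`, as the remaining suffix
def pvSkipBlanksA : List String → List String
  | [] => []
  | l :: rest => if PySem.Str.strip l == "" then pvSkipBlanksA rest else l :: rest

-- needed by pvLoopA's decreasing_by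
lemma pvSkipBlanksA_length_le (l : List String) : (pvSkipBlanksA l).length ≤ l.length := by
  induction l with
  | nil => simp [pvSkipBlanksA]
  | cons x xs ih =>
    simp only [pvSkipBlanksA]; split
    · simp; omega
    · simp

-- the `while i < len(lines)` loop over the remaining suffix of lines, accumulating result
def pvLoopA : List String → List String → List String
  | [], result => result
  | line :: rest, result =>
    let result1 := result ++ [line]
    if pvStartsWithA "region:" line then
      let rest' := pvSkipBlanksA rest
      pvLoopA rest' (if rest'.isEmpty then result1 else result1 ++ [""])
    else if pvStartsWithA "easy apply:" line then
      let rest' := pvSkipBlanksA rest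
      pvLoopA rest' (if rest'.isEmpty then result1 else result1 ++ [""])
    else
      pvLoopA rest
        (match rest with
          | next :: _ =>
            if pvStartsWithA "location:" next && !result1.isEmpty
                && PySem.List.pyGetD result1 (-1) "" != "" then
              result1 ++ [""]
            else result1
          | [] => result1)
  termination_by l _ => l.length
  decreasing_by
  · exact Nat.lt_succ_of_le (pvSkipBlanksA_length_le rest)
  · exact Nat.lt_succ_of_le (pvSkipBlanksA_length_le rest)
  · simp

def normalize_job_message_spacing (text : String) : String :=
  let normalized :=
    PySem.Str.strip (PySem.Str.replace (PySem.Str.replace text "\r\n" "\n") "\r" "\n")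
  let lines := (PySem.Str.split? normalized "\n").getD []
  PySem.Str.strip (PySem.Str.join "\n" (pvLoopA lines []))

-- ===== PORT B =====
def pvStartsWithB (label line : String) : Bool :=
  PySem.Str.startswith (PySem.Str.lower (PySem.Str.lstrip line)) label

-- one iteration of Source B's for-loop; state = (result, skip_blanks)
def pvStepB (st : List String × Bool) (line : String) : List String × Bool :=
  match st with
  | (result, skip) =>
    if skip && (PySem.Str.strip line == "") then (result, true)
    else
      let result := if skip then result ++ [""] else result
      let result :=
        if pvStartsWithB "location:" line && !result.isEmpty
            && PySem.List.pyGetD result (-1) "" != "" then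
          result ++ [""]
        else result
      (result ++ [line],
       pvStartsWithB "region:" line || pvStartsWithB "easy apply:" line)

def normalize_job_message_spacing_alt (text : String) : String :=
  let normalized :=
    PySem.Str.strip (PySem.Str.replace (PySem.Str.replace text "\r\n" "\n") "\r" "\n")
  let lines := (PySem.Str.split? normalized "\n").getD []
  PySem.Str.strip (PySem.Str.join "\n" ((lines.foldl pvStepB ([], false)).1))

-- ===== PRECONDITION & SPEC =====
def Spec_normalize_job_message_spacing (text : String) (out : String) : Prop := out = normalize_job_message_spacing_alt text
instance (text : String) (out : String) : Decidable (Spec_normalize_job_message_spacing text out) := by unfold Spec_normalize_job_message_spacing; infer_instance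

-- ===== CLAIM (what is proved, stated in full; the proofs are below) =====
def Claim_equal_normalize_job_message_spacing : Prop := ∀ (text : String), Dom_normalize_job_message_spacing text → Spec_normalize_job_message_spacing text (normalize_job_message_spacing text)

-- ===== LEMMAS AND PROOFS =====

-- a "region:" / "easy apply:" line is never a "location:" line (first characters differ)
lemma pvNotLoc_of_prefix {p : List Char} (line : String) (hp : p ≠ [])
    (hne : p.head hp ≠ 'l')
    (h : PySem.Str.startswith (PySem.Str.lower (PySem.Str.lstrip line)) (String.ofList p) = true) :
    pvStartsWithB "location:" line = false := by
  unfold pvStartsWithB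
  rw [PySem.Str.startswith_eq] at h ⊢
  rw [show ("location:".toList) = ['l','o','c','a','t','i','o','n',':'] from rfl]
  by_contra hb
  rw [Bool.not_eq_false, PySem.Chars.startswith_iff] at hb
  rw [PySem.Chars.startswith_iff] at h
  simp at h
  obtain ⟨t1, ht1⟩ := h
  obtain ⟨t2, ht2⟩ := hb
  simp only [PySem.Str.toList_lower, PySem.Str.toList_lstrip] at ht2
  rw [← ht1] at ht2
  cases p with
  | nil => exact hp rfl
  | cons a q =>
    simp at ht2
    exact hne (by simp; exact ht2.1.symm)

lemma pvNotLoc_of_region (line : String) (h : pvStartsWithA "region:" line = true) :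
    pvStartsWithB "location:" line = false := by
  unfold pvStartsWithA at h
  exact pvNotLoc_of_prefix (p := ['r','e','g','i','o','n',':']) line (by simp) (by decide) h

lemma pvNotLoc_of_ea (line : String) (h : pvStartsWithA "easy apply:" line = true) :
    pvStartsWithB "location:" line = false := by
  unfold pvStartsWithA at h
  exact pvNotLoc_of_prefix (p := ['e','a','s','y',' ','a','p','p','l','y',':']) line (by simp)
    (by decide) h

lemma pvStepB_skip_nonblank (result : List String) (line : String)
    (h : (PySem.Str.strip line == "") = false) :
    pvStepB (result, true) line = pvStepB (result ++ [""], false) line := by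
  simp [pvStepB, h, PySem.List.pyGetD_neg_one_append_singleton]

-- running B's loop from a skip_blanks=true state = A's blank skip, then one "" if lines remain
lemma pvFoldB_skip (l : List String) (r : List String) :
    (l.foldl pvStepB (r, true)).1 =
      (if (pvSkipBlanksA l).isEmpty then r
       else ((pvSkipBlanksA l).foldl pvStepB (r ++ [""], false)).1) := by
  induction l with
  | nil => simp [pvSkipBlanksA]
  | cons x xs ih =>
    by_cases hb : (PySem.Str.strip x == "") = true
    · have hstep : pvStepB (r, true) x = (r, true) := by simp [pvStepB, hb]
      simp only [List.foldl_cons, hstep, pvSkipBlanksA, hb, if_pos]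
      exact ih
    · simp only [Bool.not_eq_true] at hb
      simp only [List.foldl_cons, pvSkipBlanksA, hb, Bool.false_eq_true,
        pvStepB_skip_nonblank r x hb]
      simp

-- main invariant: if the next line is a Location line, r already ends with "" (or is empty)
lemma pvMain : ∀ (n : Nat) (l r : List String), l.length ≤ n →
    (∀ x xs, l = x :: xs → pvStartsWithB "location:" x = true →
      PySem.List.pyGetD r (-1) "" = "") →
    pvLoopA l r = (l.foldl pvStepB (r, false)).1 := by
  intro n
  induction n with
  | zero =>
    intro l r hlen _
    have hl : l = [] := List.eq_nil_of_length_eq_zero (Nat.le_zero.mp hlen)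
    subst hl; simp [pvLoopA]
  | succ m ih =>
    intro l r hlen hinv
    cases l with
    | nil => simp [pvLoopA]
    | cons line rest =>
      have hlen' : rest.length ≤ m := by simp at hlen; omega
      by_cases hr : pvStartsWithA "region:" line = true
      · have hloc := pvNotLoc_of_region line hr
        have hstep : pvStepB (r, false) line = (r ++ [line], true) := by
          simp [pvStepB, hloc]
          left; exact hr
        rw [List.foldl_cons, hstep, pvFoldB_skip, pvLoopA.eq_def]
        simp only [if_pos hr]
        by_cases he : (pvSkipBlanksA rest).isEmpty
        · have hnil : pvSkipBlanksA rest = [] := List.isEmpty_iff.mp he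
          simp [hnil, pvLoopA]
        · simp only [he, Bool.false_eq_true]
          exact ih _ _ (le_trans (pvSkipBlanksA_length_le rest) hlen')
            (fun x xs hx hlocx => PySem.List.pyGetD_neg_one_append_singleton _ _ _)
      · by_cases hea : pvStartsWithA "easy apply:" line = true
        · have hloc := pvNotLoc_of_ea line hea
          have hstep : pvStepB (r, false) line = (r ++ [line], true) := by
            simp [pvStepB, hloc]
            right; exact hea
          rw [List.foldl_cons, hstep, pvFoldB_skip, pvLoopA.eq_def]
          simp only [if_neg hr, if_pos hea]
          by_cases he : (pvSkipBlanksA rest).isEmpty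
          · have hnil : pvSkipBlanksA rest = [] := List.isEmpty_iff.mp he
            simp [hnil, pvLoopA]
          · simp only [he, Bool.false_eq_true]
            exact ih _ _ (le_trans (pvSkipBlanksA_length_le rest) hlen')
              (fun x xs hx hlocx => PySem.List.pyGetD_neg_one_append_singleton _ _ _)
        · -- normal line
          have hstep : pvStepB (r, false) line = (r ++ [line], false) := by
            by_cases hll : pvStartsWithB "location:" line = true
            · have hr0 : PySem.List.pyGetD r (-1) "" = "" := hinv line rest rfl hll
              simp [pvStepB, hr0]
              exact ⟨by simpa using hr, by simpa using hea⟩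
            · simp only [Bool.not_eq_true] at hll
              simp [pvStepB, hll]
              exact ⟨by simpa using hr, by simpa using hea⟩
          rw [List.foldl_cons, hstep]
          cases rest with
          | nil => rw [pvLoopA.eq_def]; simp [hr, hea, pvLoopA]
          | cons next rest2 =>
            have hlast : PySem.List.pyGetD (r ++ [line]) (-1) "" = line :=
              PySem.List.pyGetD_neg_one_append_singleton _ _ _
            rw [pvLoopA.eq_def]
            simp only [if_neg hr, if_neg hea]
            by_cases hcond : (pvStartsWithA "location:" next && !(r ++ [line]).isEmpty
                && PySem.List.pyGetD (r ++ [line]) (-1) "" != "") = true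
            · rw [if_pos hcond]
              have hln : pvStartsWithB "location:" next = true := by
                simp at hcond; exact hcond.1
              have hne' : ¬ line = "" := by
                simp [hlast] at hcond; exact hcond.2
              rw [ih _ _ (by simpa using hlen')
                (fun x xs hx hlocx => PySem.List.pyGetD_neg_one_append_singleton _ _ _)]
              have h0 : PySem.List.pyGetD (r ++ [line, ""]) (-1) "" = "" := by
                simpa using PySem.List.pyGetD_neg_one_append_singleton (r ++ [line]) ("" : String) ""
              have hstep2 : pvStepB (r ++ [line] ++ [""], false) next
                  = pvStepB (r ++ [line], false) next := by
                simp [pvStepB, hln, hlast, hne', h0]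
              rw [List.foldl_cons, List.foldl_cons, hstep2]
            · rw [if_neg hcond]
              refine ih _ _ (by simpa using hlen') ?_
              intro x xs hx hlocx
              cases hx
              rw [hlast]
              by_contra hne
              apply hcond
              simp [hlast]
              exact ⟨hlocx, hne⟩

-- ===== VERDICT (by name: the statement is the Claim_ definition above) =====
theorem normalize_job_message_spacing_spec : Claim_equal_normalize_job_message_spacing := by
  intro text _
  unfold Spec_normalize_job_message_spacing normalize_job_message_spacing normalize_job_message_spacing_alt
  exact congrArg (fun l => PySem.Str.strip (PySem.Str.join "\n" l))
    (pvMain _ _ [] le_rfl (by intro x xs _ _; rfl))
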